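-- pv_equiv track=rewrite | github.com/ohadren-source/rilie-net | RILIE (3,6,9)/chomsky_speech_engine.py | has_clear_subject
-- ===== SOURCE A (Python) =====
-- def has_clear_subject(sentence: str) -> bool:
--     """Check if a sentence has a clear grammatical subject."""
--     # Simple heuristic: does it have a pronoun or noun at the start?
--     subject_indicators = [
--         "i ", "you ", "he ", "she ", "it ", "we ", "they ",
--         "this ", "that ", "these ", "those ",
--         "the ", "a ", "an ",
--     ]
--     s = sentence.lower().strip()
--     return any(s.startswith(ind) for ind in subject_indicators)
-- ===== SOURCE B (Python) =====
-- _SUBJECT_WORDS = {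
--     "i", "you", "he", "she", "it", "we", "they",
--     "this", "that", "these", "those",
--     "the", "a", "an",
-- }
--
-- def has_clear_subject(sentence: str) -> bool:
--     """Check if a sentence has a clear grammatical subject."""
--     s = sentence.lower().strip()
--     token = ""
--     for ch in s:
--         if ch == " ":
--             return token in _SUBJECT_WORDS
--         token += ch
--     return False
-- ===== Notes on version B (the rewrite author's own statement) =====
-- stated objective: alternative
-- what changed: Replaces the 14-way any/startswith prefix scan with a single left-to-right character scan that accumulates the first token and does one set-membership test at the first space.
import Mathlib
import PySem

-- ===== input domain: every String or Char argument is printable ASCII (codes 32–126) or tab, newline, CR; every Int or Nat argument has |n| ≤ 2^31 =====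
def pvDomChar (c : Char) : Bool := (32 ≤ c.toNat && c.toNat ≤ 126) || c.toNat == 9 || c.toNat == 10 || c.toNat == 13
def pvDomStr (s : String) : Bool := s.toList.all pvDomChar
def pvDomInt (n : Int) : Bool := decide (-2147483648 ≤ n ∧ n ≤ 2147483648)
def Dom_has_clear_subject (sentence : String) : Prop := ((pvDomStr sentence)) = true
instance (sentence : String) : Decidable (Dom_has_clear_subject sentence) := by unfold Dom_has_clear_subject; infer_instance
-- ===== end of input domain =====

-- B replaces A's 14-way any/startswith prefix scan with one left-to-right character
-- scan that accumulates the first token and tests it once against a word set at the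
-- first space (objective: alternative).

-- ===== PORT A =====
def has_clear_subject (sentence : String) : Bool :=
  let subject_indicators : List String :=
    ["i ", "you ", "he ", "she ", "it ", "we ", "they ",
     "this ", "that ", "these ", "those ",
     "the ", "a ", "an "]
  let s := PySem.Str.strip (PySem.Str.lower sentence)
  subject_indicators.any (fun ind => PySem.Str.startswith s ind)

-- ===== PORT B =====
def pvSubjectSet : PySem.Set String :=
  PySem.Set.ofList
    ["i", "you", "he", "she", "it", "we", "they",
     "this", "that", "these", "those",
     "the", "a", "an"]

-- the 'for ch in s' loop of Source B: 'token' is the accumulator, early return at a space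
def pvScan : List Char → List Char → Bool
  | [], _ => false
  | ch :: rest, token =>
      if ch = ' ' then PySem.Set.contains pvSubjectSet (String.ofList token)
      else pvScan rest (token ++ [ch])

def has_clear_subject_alt (sentence : String) : Bool :=
  let s := PySem.Str.strip (PySem.Str.lower sentence)
  pvScan s.toList []

-- ===== PRECONDITION & SPEC =====
def Spec_has_clear_subject (sentence : String) (out : Bool) : Prop := out = has_clear_subject_alt sentence
instance (sentence : String) (out : Bool) : Decidable (Spec_has_clear_subject sentence out) := by unfold Spec_has_clear_subject; infer_instance

-- ===== CLAIM (what is proved, stated in full; the proofs are below) =====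
def Claim_equal_has_clear_subject : Prop := ∀ (sentence : String), Dom_has_clear_subject sentence → Spec_has_clear_subject sentence (has_clear_subject sentence)

-- ===== LEMMAS AND PROOFS =====

-- A word followed by a space is a prefix of l iff l contains a space and the
-- first space-delimited token of l is exactly that word.
theorem pv_tok_prefix (w l : List Char) (hw : ' ' ∉ w) :
    (w ++ [' ']) <+: l ↔ (' ' ∈ l ∧ l.takeWhile (· ≠ ' ') = w) := by
  induction w generalizing l with
  | nil =>
      cases l with
      | nil => simp
      | cons c l' =>
          by_cases hc : c = ' '
          · subst hc; simp [List.cons_prefix_cons]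
          · simp [List.cons_prefix_cons, hc, Ne.symm hc]
  | cons c w' ih =>
      have hc : c ≠ ' ' := fun h => hw (h ▸ List.mem_cons_self)
      have hw' : ' ' ∉ w' := fun h => hw (List.mem_cons_of_mem _ h)
      cases l with
      | nil => simp
      | cons d l' =>
          by_cases hd : d = c
          · subst hd
            simp only [List.cons_append, List.cons_prefix_cons, true_and,
              List.takeWhile_cons, ih l' hw']
            simp [hc, List.mem_cons, Ne.symm hc]
          · by_cases hds : d = ' '
            · subst hds
              simp [List.cons_prefix_cons, Ne.symm hd]
            · simp [List.cons_prefix_cons, Ne.symm hd, hds, hd]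

-- A's startswith test, rephrased through the first token.
theorem pv_startswith_word (s w : String) (hw : ' ' ∉ w.toList) :
    PySem.Str.startswith s (w ++ " ") = true ↔
      (' ' ∈ s.toList ∧ s.toList.takeWhile (· ≠ ' ') = w.toList) := by
  have htl : (w ++ " ").toList = w.toList ++ [' '] := by
    rw [String.toList_append]; rfl
  rw [PySem.Str.startswith_eq, PySem.Chars.startswith_iff, htl, pv_tok_prefix _ _ hw]

-- Invariant of B's scan loop.
theorem pv_scan_eq (l acc : List Char) :
    pvScan l acc =
      if ' ' ∈ l then
        PySem.Set.contains pvSubjectSet (String.ofList (acc ++ l.takeWhile (· ≠ ' ')))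
      else false := by
  induction l generalizing acc with
  | nil => simp [pvScan]
  | cons c rest ih =>
      by_cases hc : c = ' '
      · subst hc; simp [pvScan]
      · rw [pvScan, if_neg hc, ih]
        simp [hc, Ne.symm hc, List.append_assoc]

theorem pv_indicators_eq :
    (["i ", "you ", "he ", "she ", "it ", "we ", "they ",
      "this ", "that ", "these ", "those ",
      "the ", "a ", "an "] : List String)
      = pvSubjectSet.map (fun w => w ++ " ") := rfl

theorem pv_words_no_space : ∀ w ∈ pvSubjectSet, ' ' ∉ w.toList := by decide

-- ===== VERDICT (by name: the statement is the Claim_ definition above) =====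
theorem has_clear_subject_spec : Claim_equal_has_clear_subject := by
  intro sentence _
  unfold Spec_has_clear_subject has_clear_subject has_clear_subject_alt
  dsimp only
  rw [pv_indicators_eq, List.any_map]
  set s := PySem.Str.strip (PySem.Str.lower sentence) with hs
  rw [pv_scan_eq]
  by_cases hsp : ' ' ∈ s.toList
  · rw [if_pos hsp, List.nil_append, Bool.eq_iff_iff, PySem.Set.contains_iff]
    simp only [List.any_eq_true, Function.comp_apply]
    constructor
    · rintro ⟨w, hwmem, hst⟩
      have ht := ((pv_startswith_word s w (pv_words_no_space w hwmem)).mp hst).2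
      have : String.ofList (s.toList.takeWhile (· ≠ ' ')) = w := by
        rw [ht]; exact String.ofList_toList
      rw [this]; exact hwmem
    · intro hmem
      exact ⟨String.ofList (s.toList.takeWhile (· ≠ ' ')), hmem,
        (pv_startswith_word s _ (pv_words_no_space _ hmem)).mpr ⟨hsp, by rw [String.toList_ofList]⟩⟩
  · rw [if_neg hsp]
    rw [List.any_eq_false]
    intro w hwmem
    simp only [Function.comp_apply]
    rw [Bool.not_eq_true, ← Bool.not_eq_true, pv_startswith_word s w (pv_words_no_space w hwmem)]
    exact fun ⟨h1, _⟩ => hsp h1
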